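-- pv_equiv track=rewrite | github.com/cdhop/General | misc/prm.py | build_distribution
-- ===== SOURCE A (Python) =====
-- def build_distribution(modulo, base):
--     distribution = dict()
--
--     for index in range(1, modulo):
--         result = pow(base, index) % modulo
--         if result in distribution.keys():
--             distribution[result] = distribution[result] + 1
--         else:
--             distribution[result] = 1
--
--     return distribution
-- ===== SOURCE B (Python) =====
-- def _residues(modulo, base):
--     """Residues base^1 % modulo, ..., base^(modulo-1) % modulo by incremental
--     modular multiplication (no bignum exponentiation)."""
--     out = []
--     r = 1
--     for _ in range(modulo - 1):
--         r = r * base % modulo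
--         out.append(r)
--     return out
--
--
-- def build_distribution(modulo, base):
--     counts = {}
--     for r in _residues(modulo, base):
--         counts[r] = counts.get(r, 0) + 1
--     return counts
-- ===== Notes on version B (the rewrite author's own statement) =====
-- stated objective: faster
-- what changed: Two staged passes: first generate the residue sequence by incremental modular multiplication r = r*base % modulo (instead of recomputing pow(base, index) from scratch each iteration), then count the residues with a get-based counter dict.
import Mathlib
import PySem

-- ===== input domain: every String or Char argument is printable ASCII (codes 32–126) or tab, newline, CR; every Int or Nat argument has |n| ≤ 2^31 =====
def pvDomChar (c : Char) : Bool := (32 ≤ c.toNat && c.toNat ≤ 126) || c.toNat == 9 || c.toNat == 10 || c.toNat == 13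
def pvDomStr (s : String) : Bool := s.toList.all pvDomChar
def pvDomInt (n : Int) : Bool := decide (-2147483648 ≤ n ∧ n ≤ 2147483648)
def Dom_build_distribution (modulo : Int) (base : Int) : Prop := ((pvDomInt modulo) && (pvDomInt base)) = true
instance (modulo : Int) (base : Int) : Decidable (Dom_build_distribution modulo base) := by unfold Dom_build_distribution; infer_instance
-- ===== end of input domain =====

-- B stages the work: it first builds the residue sequence by incremental modular
-- multiplication r = r*base % modulo, then counts the residues (objective: faster).

-- ===== PORT A =====
-- pow(base, index): index comes from range(1, modulo), hence index ≥ 1, so index.toNat is exact.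
def build_distribution (modulo : Int) (base : Int) : List (Int × Int) :=
  ((PySem.List.pyRange 1 modulo 1).foldl
    (fun d index =>
      let result := PySem.Int.mod (base ^ index.toNat) modulo
      if d.contains result then d.insert result (d.getD result 0 + 1)
      else d.insert result 1)
    (PySem.Dict.empty : PySem.Dict Int Int)).items

-- ===== PORT B =====
-- _residues: the append-loop over range(modulo-1) as structural recursion on the
-- remaining iteration count, carrying the running residue r.
def pvResidues (modulo : Int) (base : Int) : Nat → Int → List Int
  | 0, _ => []
  | n + 1, r =>
      let r' := PySem.Int.mod (r * base) modulo
      r' :: pvResidues modulo base n r'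

def build_distribution_alt (modulo : Int) (base : Int) : List (Int × Int) :=
  ((pvResidues modulo base (modulo - 1).toNat 1).foldl
    (fun counts r => counts.insert r (counts.getD r 0 + 1))
    (PySem.Dict.empty : PySem.Dict Int Int)).items

-- ===== PRECONDITION & SPEC =====
def Spec_build_distribution (modulo : Int) (base : Int) (out : List (Int × Int)) : Prop := out = build_distribution_alt modulo base
instance (modulo : Int) (base : Int) (out : List (Int × Int)) : Decidable (Spec_build_distribution modulo base out) := by unfold Spec_build_distribution; infer_instance

-- ===== CLAIM (what is proved, stated in full; the proofs are below) =====
def Claim_equal_build_distribution : Prop := ∀ (modulo : Int) (base : Int), Dom_build_distribution modulo base → Spec_build_distribution modulo base (build_distribution modulo base)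

-- ===== LEMMAS AND PROOFS =====

-- A's guarded update is exactly "insert result (getD result 0 + 1)".
theorem pvStepA_eq (d : PySem.Dict Int Int) (k : Int) :
    (if d.contains k then d.insert k (d.getD k 0 + 1) else d.insert k 1)
      = d.insert k (d.getD k 0 + 1) := by
  by_cases h : d.contains k
  · simp [h]
  · rw [if_neg h, PySem.Dict.getD_of_not_contains d 0 (by simpa using h)]; norm_num

-- floor-mod absorbs an inner floor-mod in a product (positive modulus).
theorem pvMod_mul_mod (m x y : Int) (hm : 0 < m) :
    PySem.Int.mod (PySem.Int.mod x m * y) m = PySem.Int.mod (x * y) m := by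
  rw [PySem.Int.mod_eq_emod_of_pos hm, PySem.Int.mod_eq_emod_of_pos hm,
      PySem.Int.mod_eq_emod_of_pos hm, Int.mul_emod, Int.emod_emod_of_dvd _ dvd_rfl,
      ← Int.mul_emod]

-- Loop invariant: if r ≡ base^(a.toNat - 1) (mod m), A's fold over range(a, a+n)
-- equals counting the n residues generated by B from r, starting from the same dict.
theorem pvLoop (m base : Int) (hm : 0 < m) :
    ∀ (n : Nat) (a : Int), 1 ≤ a →
    ∀ (r : Int), PySem.Int.mod r m = PySem.Int.mod (base ^ (a.toNat - 1)) m →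
    ∀ (d : PySem.Dict Int Int),
      (PySem.List.pyRange a (a + n) 1).foldl
        (fun d index =>
          let result := PySem.Int.mod (base ^ index.toNat) m
          if d.contains result then d.insert result (d.getD result 0 + 1)
          else d.insert result 1) d
      = (pvResidues m base n r).foldl
          (fun counts r => counts.insert r (counts.getD r 0 + 1)) d := by
  intro n
  induction n with
  | zero =>
      intro a _ r _ d
      simp [PySem.List.pyRange_one_eq_nil (le_refl a), pvResidues]
  | succ k ih =>
      intro a ha r hr d
      have hab : a < a + (k + 1 : Nat) := by omega
      rw [PySem.List.pyRange_one_cons hab]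
      simp only [List.foldl_cons, pvResidues]
      have hkey : PySem.Int.mod (r * base) m = PySem.Int.mod (base ^ a.toNat) m := by
        calc PySem.Int.mod (r * base) m
            = PySem.Int.mod (PySem.Int.mod r m * base) m := (pvMod_mul_mod m r base hm).symm
          _ = PySem.Int.mod (PySem.Int.mod (base ^ (a.toNat - 1)) m * base) m := by rw [hr]
          _ = PySem.Int.mod (base ^ (a.toNat - 1) * base) m := pvMod_mul_mod m _ base hm
          _ = PySem.Int.mod (base ^ a.toNat) m := by
                rw [← pow_succ]; congr 2; omega
      have hstep := pvStepA_eq d (PySem.Int.mod (base ^ a.toNat) m)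
      have hrange : a + (k + 1 : Nat) = (a + 1) + (k : Nat) := by push_cast; ring
      rw [hrange]
      simp only [hstep, hkey]
      apply ih (a + 1) (by omega)
      have h1 : (a + 1).toNat - 1 = a.toNat := by omega
      rw [h1, PySem.Int.mod_eq_emod_of_pos hm, PySem.Int.mod_eq_emod_of_pos hm,
          Int.emod_emod_of_dvd _ dvd_rfl]

-- ===== VERDICT (by name: the statement is the Claim_ definition above) =====
theorem build_distribution_spec : Claim_equal_build_distribution := by
  intro m base _
  unfold Spec_build_distribution build_distribution build_distribution_alt
  by_cases hm : 1 < m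
  · have h1 : (1 : Int) + ((m - 1).toNat : Int) = m := by omega
    have := pvLoop m base (by omega) (m - 1).toNat 1 (le_refl 1) 1 (by norm_num)
      PySem.Dict.empty
    rw [h1] at this
    rw [this]
  · have h0 : (m - 1).toNat = 0 := by omega
    rw [PySem.List.pyRange_one_eq_nil (by omega : m ≤ 1), h0]
    rfl
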